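-- pv_equiv track=rewrite | github.com/pandas-dev/pandas | venv/Lib/site-packages/xlsxwriter/worksheet.py | _prepare_table_formula
-- ===== SOURCE A (Python) =====
-- def _prepare_table_formula(formula):
--     if "@" not in formula:
--         # No escaping required.
--         return formula
--
--     escaped_formula = []
--     in_string_literal = False
--
--     for char in formula:
--         # Match the start/end of string literals to avoid escaping
--         # references in strings.
--         if char == '"':
--             in_string_literal = not in_string_literal
--
--         # Copy the string literal.
--         if in_string_literal:
--             escaped_formula.append(char)
--             continue
--
--         # Replace table reference.
--         if char == "@":
--             escaped_formula.append("[#This Row],")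
--         else:
--             escaped_formula.append(char)
--
--     return ("").join(escaped_formula)
-- ===== SOURCE B (Python) =====
-- def _prepare_table_formula(formula):
--     parts = formula.split('"')
--     return '"'.join(
--         part.replace("@", "[#This Row],") if i % 2 == 0 else part
--         for i, part in enumerate(parts)
--     )
-- ===== Notes on version B (the rewrite author's own statement) =====
-- stated objective: idiomatic
-- what changed: Replaced the char-by-char loop with an in_string_literal flag by splitting on the double-quote character (even-indexed segments lie outside string literals), applying str.replace to the even segments only, and rejoining with the quote character.
import Mathlib
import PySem

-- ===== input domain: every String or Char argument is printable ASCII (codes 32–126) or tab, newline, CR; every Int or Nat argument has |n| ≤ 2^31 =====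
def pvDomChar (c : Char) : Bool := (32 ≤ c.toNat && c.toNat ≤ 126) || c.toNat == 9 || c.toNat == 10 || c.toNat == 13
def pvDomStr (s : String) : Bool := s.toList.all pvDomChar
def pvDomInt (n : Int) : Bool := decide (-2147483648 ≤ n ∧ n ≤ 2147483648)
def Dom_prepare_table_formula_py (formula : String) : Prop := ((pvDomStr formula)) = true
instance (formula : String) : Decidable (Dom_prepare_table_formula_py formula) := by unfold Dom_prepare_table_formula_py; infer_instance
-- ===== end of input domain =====

-- B replaces A's char-by-char quote state machine by split-on-'"' / replace-in-even-segments / rejoin (objective: idiomatic).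


-- ===== PORT A =====
-- literal port of A: early return when '@' absent, then a fold over the characters
-- carrying (escaped_formula, in_string_literal), followed by ("").join.
def prepare_table_formula_py (formula : String) : String :=
  if PySem.Chars.isIn ['@'] formula.toList = false then
    formula
  else
    let res := formula.toList.foldl
      (fun (st : List (List Char) × Bool) char =>
        let st := if char = '"' then (st.1, !st.2) else st
        if st.2 then (st.1 ++ [[char]], st.2)
        else if char = '@' then (st.1 ++ ["[#This Row],".toList], st.2)
        else (st.1 ++ [[char]], st.2))
      ([], false)
    String.ofList (PySem.Chars.join [] res.1)

-- ===== PORT B =====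
-- literal port of B: split on '"', replace '@' only in even-indexed parts, rejoin with '"'.
def prepare_table_formula_py_alt (formula : String) : String :=
  let parts := PySem.Chars.splitOn formula.toList ['"']
  String.ofList (PySem.Chars.join ['"']
    ((PySem.List.enumerate parts 0).map
      (fun p => if p.1 % 2 == 0 then PySem.Chars.replace p.2 ['@'] "[#This Row],".toList else p.2)))

-- ===== PRECONDITION & SPEC =====
def Spec_prepare_table_formula_py (formula : String) (out : String) : Prop := out = prepare_table_formula_py_alt formula
instance (formula : String) (out : String) : Decidable (Spec_prepare_table_formula_py formula out) := by unfold Spec_prepare_table_formula_py; infer_instance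

-- ===== CLAIM (what is proved, stated in full; the proofs are below) =====
def Claim_equal_prepare_table_formula_py : Prop := ∀ (formula : String), Dom_prepare_table_formula_py formula → Spec_prepare_table_formula_py formula (prepare_table_formula_py formula)

-- ===== LEMMAS AND PROOFS =====

/-- Replacement of '@' by "[#This Row]," in a quote-free segment. -/
def pvRepl (l : List Char) : List Char :=
  l.flatMap (fun c => if c = '@' then "[#This Row],".toList else [c])

/-- Python `s.split('"')` as a structural recursion. -/
def pvSplit : List Char → List (List Char)
  | [] => [[]]
  | c :: t =>
    if c = '"' then [] :: pvSplit t
    else match pvSplit t with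
      | [] => [[c]]
      | p :: ps => (c :: p) :: ps

/-- A's state machine as a direct recursion on the characters. -/
def pvGoA (b : Bool) : List Char → List Char
  | [] => []
  | c :: t =>
    let b' := if c = '"' then !b else b
    if b' then c :: pvGoA b' t
    else if c = '@' then "[#This Row],".toList ++ pvGoA b' t
    else c :: pvGoA b' t

/-- Rejoin the parts with '"', replacing '@' in even-indexed parts (b = current index is odd). -/
def pvJoinAlt (b : Bool) : List (List Char) → List Char
  | [] => []
  | [p] => if b then p else pvRepl p
  | p :: q :: ps => (if b then p else pvRepl p) ++ '"' :: pvJoinAlt (!b) (q :: ps)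

theorem pvSplit_ne_nil (l : List Char) : pvSplit l ≠ [] := by
  cases l with
  | nil => simp [pvSplit]
  | cons c t =>
    simp only [pvSplit]
    split
    · simp
    · split <;> simp_all

theorem pvGoA_eq_joinAlt (l : List Char) (b : Bool) :
    pvGoA b l = pvJoinAlt b (pvSplit l) := by
  induction l generalizing b with
  | nil => cases b <;> simp [pvGoA, pvSplit, pvJoinAlt, pvRepl]
  | cons c t ih =>
    by_cases hc : c = '"'
    · subst hc
      obtain ⟨p, ps, hps⟩ := List.exists_cons_of_ne_nil (pvSplit_ne_nil t)
      cases b <;> simp [pvGoA, pvSplit, pvJoinAlt, hps, ih, pvRepl]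
    · obtain ⟨p, ps, hps⟩ := List.exists_cons_of_ne_nil (pvSplit_ne_nil t)
      have hrepl : pvRepl (c :: p) = (if c = '@' then "[#This Row],".toList else [c]) ++ pvRepl p := by
        simp [pvRepl]
      cases ps with
      | nil =>
        cases b <;>
          simp [pvGoA, pvSplit, hc, hps, pvJoinAlt, ih, hrepl] <;>
          split <;> simp
      | cons q qs =>
        cases b <;>
          simp [pvGoA, pvSplit, hc, hps, pvJoinAlt, ih, hrepl] <;>
          split <;> simp

theorem pvGoA_id (l : List Char) (b : Bool) (h : '@' ∉ l) : pvGoA b l = l := by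
  induction l generalizing b with
  | nil => rfl
  | cons c t ih =>
    simp only [List.mem_cons, not_or] at h
    have hc : ¬ c = '@' := fun hh => h.1 hh.symm
    by_cases hq : c = '"' <;> cases b <;> simp [pvGoA, hq, hc, ih _ h.2]

theorem pvReplace_go_eq (fuel : Nat) (l acc : List Char) (h : l.length ≤ fuel) :
    PySem.Chars.replace.go ['@'] "[#This Row],".toList fuel l acc = acc.reverse ++ pvRepl l := by
  induction fuel generalizing l acc with
  | zero =>
    have : l = [] := by cases l <;> simp_all
    subst this
    simp [PySem.Chars.replace.go, pvRepl]
  | succ n ih =>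
    cases l with
    | nil => simp [PySem.Chars.replace.go, pvRepl]
    | cons c t =>
      simp only [List.length_cons, Nat.add_one_le_iff] at h
      by_cases hc : c = '@'
      · subst hc
        rw [show PySem.Chars.replace.go ['@'] "[#This Row],".toList (n+1) ('@' :: t) acc
              = PySem.Chars.replace.go ['@'] "[#This Row],".toList n t ("[#This Row],".toList.reverse ++ acc) from by
            simp [PySem.Chars.replace.go, List.isPrefixOf]]
        rw [ih _ _ (by omega)]
        simp [pvRepl]
      · have hc' : ¬ ('@' = c) := fun hh => hc hh.symm
        rw [show PySem.Chars.replace.go ['@'] "[#This Row],".toList (n+1) (c :: t) acc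
              = PySem.Chars.replace.go ['@'] "[#This Row],".toList n t (c :: acc) from by
            simp [PySem.Chars.replace.go, List.isPrefixOf, hc']]
        rw [ih _ _ (by omega)]
        simp [pvRepl, hc]

theorem pvReplace_eq (l : List Char) :
    PySem.Chars.replace l ['@'] "[#This Row],".toList = pvRepl l := by
  rw [show PySem.Chars.replace l ['@'] "[#This Row],".toList
        = PySem.Chars.replace.go ['@'] "[#This Row],".toList l.length l [] from rfl]
  rw [pvReplace_go_eq l.length l [] (le_refl _)]
  rfl

/-- prepend to the first part -/
def pvMapHead (pre : List Char) : List (List Char) → List (List Char)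
  | [] => []
  | p :: ps => (pre ++ p) :: ps

theorem pvSplitOn_go_eq (fuel : Nat) (l cur : List Char) (acc : List (List Char))
    (h : l.length ≤ fuel) :
    PySem.Chars.splitOn.go ['"'] fuel l cur acc = acc.reverse ++ pvMapHead cur.reverse (pvSplit l) := by
  induction fuel generalizing l cur acc with
  | zero =>
    have : l = [] := by cases l <;> simp_all
    subst this
    simp [PySem.Chars.splitOn.go, pvSplit, pvMapHead]
  | succ n ih =>
    cases l with
    | nil => simp [PySem.Chars.splitOn.go, pvSplit, pvMapHead]
    | cons c t =>
      simp only [List.length_cons, Nat.add_one_le_iff] at h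
      by_cases hc : c = '"'
      · subst hc
        rw [show PySem.Chars.splitOn.go ['"'] (n+1) ('"' :: t) cur acc
              = PySem.Chars.splitOn.go ['"'] n t [] (cur.reverse :: acc) from by
            simp [PySem.Chars.splitOn.go, List.isPrefixOf]]
        rw [ih _ _ _ (by omega)]
        obtain ⟨p, ps, hps⟩ := List.exists_cons_of_ne_nil (pvSplit_ne_nil t)
        simp [pvSplit, hps, pvMapHead]
      · have hc' : ¬ ('"' = c) := fun hh => hc hh.symm
        rw [show PySem.Chars.splitOn.go ['"'] (n+1) (c :: t) cur acc
              = PySem.Chars.splitOn.go ['"'] n t (c :: cur) acc from by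
            simp [PySem.Chars.splitOn.go, List.isPrefixOf, hc']]
        rw [ih _ _ _ (by omega)]
        obtain ⟨p, ps, hps⟩ := List.exists_cons_of_ne_nil (pvSplit_ne_nil t)
        simp [pvSplit, hps, hc, pvMapHead]

theorem pvSplitOn_eq (l : List Char) : PySem.Chars.splitOn l ['"'] = pvSplit l := by
  rw [PySem.Chars.splitOn, pvSplitOn_go_eq (l.length + 1) l [] [] (by omega)]
  obtain ⟨p, ps, hps⟩ := List.exists_cons_of_ne_nil (pvSplit_ne_nil l)
  simp [hps, pvMapHead]

theorem pvJoin_enum (parts : List (List Char)) (k : Nat) :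
    PySem.Chars.join ['"']
      ((PySem.List.enumerate parts (k : Int)).map
        (fun p => if p.1 % 2 == 0 then pvRepl p.2 else p.2))
      = pvJoinAlt (k % 2 == 1) parts := by
  induction parts generalizing k with
  | nil => rw [PySem.List.enumerate_nil, List.map_nil, PySem.Chars.join_nil]; rfl
  | cons p ps ih =>
    have hk : (((k : Int)) % 2 == 0) = !((k % 2) == 1) := by
      have hcast : ((k : Int) % 2) = ((k % 2 : Nat) : Int) := by omega
      rcases Nat.mod_two_eq_zero_or_one k with h2 | h2 <;> rw [hcast, h2] <;> decide
    cases ps with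
    | nil =>
      rw [PySem.List.enumerate_cons, PySem.List.enumerate_nil, List.map_cons, List.map_nil,
        PySem.Chars.join_singleton]
      show (if ((k : Int) % 2 == 0) = true then pvRepl p else p) = _
      rw [hk, pvJoinAlt]
      cases (k % 2 == 1) <;> rfl
    | cons q qs =>
      have hstep : ((k : Int) + 1) = ((k + 1 : Nat) : Int) := by push_cast; ring
      have hpar : (((k + 1) % 2) == 1) = !((k % 2) == 1) := by
        rcases Nat.mod_two_eq_zero_or_one k with h2 | h2 <;> simp [Nat.add_mod, h2]
      have ih' := ih (k + 1)
      simp only [PySem.List.enumerate_cons, List.map_cons] at ih' ⊢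
      rw [PySem.Chars.join_cons_cons, hstep, ih', hpar, hk, pvJoinAlt]
      cases (k % 2 == 1) <;> simp

/-- one chunk appended by A's loop body -/
def pvChunk (b : Bool) (c : Char) : List Char :=
  let b' := if c = '"' then !b else b
  if b' then [c] else if c = '@' then "[#This Row],".toList else [c]

def pvNb (b : Bool) (c : Char) : Bool := if c = '"' then !b else b

def pvChunks (b : Bool) : List Char → List (List Char)
  | [] => []
  | c :: t => pvChunk b c :: pvChunks (pvNb b c) t

theorem pvFoldA_eq (l : List Char) (acc : List (List Char)) (b : Bool) :
    (l.foldl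
      (fun (st : List (List Char) × Bool) char =>
        let st := if char = '"' then (st.1, !st.2) else st
        if st.2 then (st.1 ++ [[char]], st.2)
        else if char = '@' then (st.1 ++ ["[#This Row],".toList], st.2)
        else (st.1 ++ [[char]], st.2))
      (acc, b)).1
    = acc ++ pvChunks b l := by
  induction l generalizing acc b with
  | nil => simp [pvChunks]
  | cons c t ih =>
    rw [List.foldl_cons]
    by_cases hq : c = '"'
    · subst hq
      cases b
      · simpa [pvChunks, pvChunk, pvNb] using ih (acc ++ [['"']]) true
      · simpa [pvChunks, pvChunk, pvNb] using ih (acc ++ [['"']]) false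
    · by_cases hat : c = '@'
      · subst hat
        cases b
        · simpa [pvChunks, pvChunk, pvNb] using ih (acc ++ ["[#This Row],".toList]) false
        · simpa [pvChunks, pvChunk, pvNb] using ih (acc ++ [['@']]) true
      · simp only [if_neg hq, if_neg hat]
        cases b
        · simpa [pvChunks, pvChunk, pvNb, hq, hat] using ih (acc ++ [[c]]) false
        · simpa [pvChunks, pvChunk, pvNb, hq, hat] using ih (acc ++ [[c]]) true

theorem pvFlatten_chunks (l : List Char) (b : Bool) :
    (pvChunks b l).flatten = pvGoA b l := by
  induction l generalizing b with
  | nil => rfl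
  | cons c t ih =>
    by_cases hc : c = '"'
    · subst hc
      cases b <;> simp [pvChunks, pvChunk, pvNb, pvGoA, ih]
    · cases b <;> by_cases hat : c = '@' <;>
        simp [pvChunks, pvChunk, pvNb, pvGoA, ih, hc, hat]

theorem pvJoinNil_flatten (parts : List (List Char)) :
    PySem.Chars.join [] parts = parts.flatten := by
  induction parts with
  | nil => simp [PySem.Chars.join_nil]
  | cons p ps ih =>
    cases ps with
    | nil => simp [PySem.Chars.join_singleton]
    | cons q qs => simp [PySem.Chars.join_cons_cons, ih]

theorem pvAlt_chars (formula : String) :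
    prepare_table_formula_py_alt formula = String.ofList (pvGoA false formula.toList) := by
  unfold prepare_table_formula_py_alt
  simp only [pvSplitOn_eq, pvReplace_eq]
  have h := pvJoin_enum (pvSplit formula.toList) 0
  simp only [Nat.cast_zero] at h
  rw [h, show ((0 % 2 : Nat) == 1) = false from rfl, ← pvGoA_eq_joinAlt]

-- ===== VERDICT (by name: the statement is the Claim_ definition above) =====
theorem prepare_table_formula_py_spec : Claim_equal_prepare_table_formula_py := by
  intro formula _
  show prepare_table_formula_py formula = prepare_table_formula_py_alt formula
  rw [pvAlt_chars]
  unfold prepare_table_formula_py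
  split
  · next h =>
    have hmem : '@' ∉ formula.toList := by
      intro hm
      obtain ⟨s, t, hst⟩ := List.append_of_mem hm
      have htrue : PySem.Chars.isIn ['@'] formula.toList = true := by
        rw [PySem.Chars.isIn_iff_infix]
        exact ⟨s, t, by simp [hst]⟩
      simp [htrue] at h
    rw [pvGoA_id _ _ hmem]
    simp
  · dsimp only
    rw [pvFoldA_eq formula.toList [] false, List.nil_append, pvJoinNil_flatten,
      pvFlatten_chunks]
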